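-- pv_equiv track=rewrite | github.com/krispychipz/SF-apt-hunter | parser/scrapers/jacksongroup_scraper.py | _compose_address
-- ===== SOURCE A (Python) =====
-- from typing import Any, Iterable, List, Optional
--
-- def _compose_address(listing: dict[str, Any]) -> Optional[str]:
--     address = listing.get("full_address")
--     if isinstance(address, str) and address.strip():
--         return address.strip()
--
--     components: List[str] = []
--     primary = listing.get("address_address1")
--     secondary = listing.get("address_address2")
--     city = listing.get("address_city")
--     state = listing.get("address_state")
--     postal_code = listing.get("address_postal_code")
--
--     for part in (primary, secondary):
--         if isinstance(part, str) and part.strip():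
--             components.append(part.strip())
--
--     locality_parts = [
--         part.strip()
--         for part in (city or "", state or "", postal_code or "")
--         if isinstance(part, str) and part.strip()
--     ]
--     if locality_parts:
--         components.append(", ".join(locality_parts[:2]) if len(locality_parts) > 1 else locality_parts[0])
--         if len(locality_parts) > 2:
--             components[-1] = ", ".join(locality_parts)
--
--     if not components:
--         return None
--     if len(components) == 1:
--         return components[0]
--     return ", ".join(components)
-- ===== SOURCE B (Python) =====
-- from typing import Any, Optional
--
-- _FIELD_KEYS = ("address_address1", "address_address2", "address_city",
--                "address_state", "address_postal_code")
--
-- def _compose_address(listing: dict[str, Any]) -> Optional[str]: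
--     address = listing.get("full_address")
--     if isinstance(address, str) and address.strip():
--         return address.strip()
--     parts = [v.strip() for v in (listing.get(k) for k in _FIELD_KEYS)
--              if isinstance(v, str) and v.strip()]
--     return ", ".join(parts) if parts else None
-- ===== Notes on version B (the rewrite author's own statement) =====
-- stated objective: simpler
-- what changed: Replaces A's two-stage assembly (separate primary/secondary loop, a locality sub-list with take-2/overwrite special cases, and a length-1 early return) with a single flat pass over the five fields joined once, since the locality sub-join uses the same ', ' separator as the outer join.
import Mathlib
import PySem

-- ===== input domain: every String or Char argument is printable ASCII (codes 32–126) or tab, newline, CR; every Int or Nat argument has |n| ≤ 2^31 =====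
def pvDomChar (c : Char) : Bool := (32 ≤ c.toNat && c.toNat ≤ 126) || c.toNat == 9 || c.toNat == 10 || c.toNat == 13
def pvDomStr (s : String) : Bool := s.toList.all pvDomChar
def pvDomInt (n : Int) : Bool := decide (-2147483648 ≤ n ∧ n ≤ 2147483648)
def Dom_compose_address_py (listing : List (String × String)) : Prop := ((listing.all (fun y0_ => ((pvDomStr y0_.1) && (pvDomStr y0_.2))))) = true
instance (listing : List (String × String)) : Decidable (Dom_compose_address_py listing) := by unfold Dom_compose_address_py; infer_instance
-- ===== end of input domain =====

-- B collapses A's separate primary/secondary loop, locality sub-join and length special cases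
-- into one flat pass over the five fields joined once; same return value, no speed claim.

-- ===== PORT A =====

-- listing.get(k): first-match lookup in the association list
def pvGet (listing : List (String × String)) (k : String) : Option String :=
  (listing.find? (fun p => p.1 == k)).map (·.2)

-- the fallback body of A after the full_address early return
def pvFallbackA (listing : List (String × String)) : Option String :=
  let primary := pvGet listing "address_address1"
  let secondary := pvGet listing "address_address2"
  let city := pvGet listing "address_city"
  let state := pvGet listing "address_state"
  let postal_code := pvGet listing "address_postal_code"
  -- for part in (primary, secondary): append part.strip() when str and nonempty
  let components : List String :=
    [primary, secondary].foldl (fun acc part =>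
      match part with
      | some s => if PySem.Str.strip s ≠ "" then acc ++ [PySem.Str.strip s] else acc
      | none => acc) []
  -- locality_parts comprehension over (city or "", state or "", postal_code or "")
  let locality_parts : List String :=
    [city.getD "", state.getD "", postal_code.getD ""].filterMap
      (fun s => if PySem.Str.strip s ≠ "" then some (PySem.Str.strip s) else none)
  let components : List String :=
    if locality_parts ≠ [] then
      let c := components ++
        [if 1 < locality_parts.length
         then PySem.Str.join ", " (locality_parts.take 2)
         else locality_parts.headD ""]
      if 2 < locality_parts.length
      then c.dropLast ++ [PySem.Str.join ", " locality_parts]   -- components[-1] = ", ".join(locality_parts)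
      else c
    else components
  if components = [] then none
  else if components.length = 1 then some (components.headD "")
  else some (PySem.Str.join ", " components)

def compose_address_py (listing : List (String × String)) : Option String :=
  match pvGet listing "full_address" with
  | some address =>
      if PySem.Str.strip address ≠ "" then some (PySem.Str.strip address)
      else pvFallbackA listing
  | none => pvFallbackA listing

-- ===== PORT B =====

def pvFieldKeys : List String :=
  ["address_address1", "address_address2", "address_city", "address_state", "address_postal_code"]

-- B's flat comprehension over the five fields, then one join
def pvFallbackB (listing : List (String × String)) : Option String :=
  let parts : List String :=
    pvFieldKeys.filterMap (fun k =>
      match pvGet listing k with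
      | some v => if PySem.Str.strip v ≠ "" then some (PySem.Str.strip v) else none
      | none => none)
  if parts ≠ [] then some (PySem.Str.join ", " parts) else none

def compose_address_py_alt (listing : List (String × String)) : Option String :=
  match pvGet listing "full_address" with
  | some address =>
      if PySem.Str.strip address ≠ "" then some (PySem.Str.strip address)
      else pvFallbackB listing
  | none => pvFallbackB listing

-- ===== PRECONDITION & SPEC =====
def Spec_compose_address_py (listing : List (String × String)) (out : Option String) : Prop := out = compose_address_py_alt listing
instance (listing : List (String × String)) (out : Option String) : Decidable (Spec_compose_address_py listing out) := by unfold Spec_compose_address_py; infer_instance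

-- ===== CLAIM (what is proved, stated in full; the proofs are below) =====
def Claim_equal_compose_address_py : Prop := ∀ (listing : List (String × String)), Dom_compose_address_py listing → Spec_compose_address_py listing (compose_address_py listing)

-- ===== LEMMAS AND PROOFS =====

-- contribution of a single field: the 0/1-element list of its stripped nonempty value
def pvF (o : Option String) : List String :=
  match o with
  | some s => if PySem.Str.strip s ≠ "" then [PySem.Str.strip s] else []
  | none => []

theorem pv_join_singleton (sep : String) (x : String) : PySem.Str.join sep [x] = x := by
  simp [PySem.Str.join, PySem.Chars.join_singleton]

theorem pv_chars_join_cons (sep : List Char) (p : List Char) (l : List (List Char)) (h : l ≠ []) :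
    PySem.Chars.join sep (p :: l) = p ++ sep ++ PySem.Chars.join sep l := by
  cases l with
  | nil => exact absurd rfl h
  | cons q rest => exact PySem.Chars.join_cons_cons sep p q rest

theorem pv_chars_join_absorb (sep : List Char) (xs ys : List (List Char)) (hy : ys ≠ []) :
    PySem.Chars.join sep (xs ++ [PySem.Chars.join sep ys]) = PySem.Chars.join sep (xs ++ ys) := by
  induction xs with
  | nil => simp [PySem.Chars.join_singleton]
  | cons x t ih =>
      have h1 : (t ++ [PySem.Chars.join sep ys]) ≠ [] := by simp
      have h2 : (t ++ ys) ≠ [] := by simp [hy]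
      simp only [List.cons_append]
      rw [pv_chars_join_cons sep x _ h1, pv_chars_join_cons sep x _ h2, ih]

theorem pv_join_absorb (sep : String) (xs ys : List String) (hy : ys ≠ []) :
    PySem.Str.join sep (xs ++ [PySem.Str.join sep ys]) = PySem.Str.join sep (xs ++ ys) := by
  simp only [PySem.Str.join, List.map_append, List.map_cons, List.map_nil]
  rw [String.toList_ofList]
  exact congrArg String.ofList (pv_chars_join_absorb sep.toList _ _ (by simpa using hy))

-- the assembled components of A join to the flat join of B
theorem pv_final (c0 l3 l4 l5 : List String) :
    (let locality_parts := l3 ++ l4 ++ l5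
     let components : List String :=
       if locality_parts ≠ [] then
         let c := c0 ++
           [if 1 < locality_parts.length
            then PySem.Str.join ", " (locality_parts.take 2)
            else locality_parts.headD ""]
         if 2 < locality_parts.length
         then c.dropLast ++ [PySem.Str.join ", " locality_parts]
         else c
       else c0
     if components = [] then none
     else if components.length = 1 then some (components.headD "")
     else some (PySem.Str.join ", " components))
    = (if c0 ++ l3 ++ l4 ++ l5 ≠ [] then some (PySem.Str.join ", " (c0 ++ l3 ++ l4 ++ l5)) else none) := by
  by_cases hL : (l3 ++ l4 ++ l5 : List String) = []
  · have h345 : l3 = [] ∧ l4 = [] ∧ l5 = [] := by simpa using hL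
    obtain ⟨h3, h4, h5⟩ := h345
    subst h3; subst h4; subst h5
    rcases c0 with _ | ⟨x, t⟩
    · simp
    · rcases t with _ | ⟨y, u⟩
      · simp [pv_join_singleton]
      · simp
  · have key : ∀ (L : List String), L ≠ [] →
        (if 2 < L.length
         then (c0 ++ [if 1 < L.length then PySem.Str.join ", " (L.take 2) else L.headD ""]).dropLast
              ++ [PySem.Str.join ", " L]
         else c0 ++ [if 1 < L.length then PySem.Str.join ", " (L.take 2) else L.headD ""])
        = c0 ++ [PySem.Str.join ", " L] := by
      intro L hNe
      by_cases h2 : 2 < L.length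
      · simp [h2]
      · by_cases h1 : 1 < L.length
        · have ht : L.take 2 = L := List.take_of_length_le (by omega)
          simp [h2, h1, ht]
        · obtain ⟨a, L', rfl⟩ := List.exists_cons_of_ne_nil hNe
          have hL' : L' = [] := by
            simp only [List.length_cons] at h1; cases L' <;> simp_all
          subst hL'
          simp [pv_join_singleton]
    simp only [hL, ne_eq, not_false_iff, if_true, key _ hL]
    rcases c0 with _ | ⟨x, t⟩
    · simp only [List.nil_append]
      rw [if_pos hL]
      simp
    · rw [pv_join_absorb ", " (x :: t) (l3 ++ l4 ++ l5) hL]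
      simp

-- characterisation of B's fallback as the concatenation of the five contributions
theorem pvFallbackB_eq (listing : List (String × String)) :
    pvFallbackB listing =
      (let parts := pvF (pvGet listing "address_address1") ++ pvF (pvGet listing "address_address2")
        ++ pvF (pvGet listing "address_city") ++ pvF (pvGet listing "address_state")
        ++ pvF (pvGet listing "address_postal_code")
       if parts ≠ [] then some (PySem.Str.join ", " parts) else none) := by
  have step : ∀ (k : String) (ks : List String),
      List.filterMap (fun k =>
        match pvGet listing k with
        | some v => if PySem.Str.strip v ≠ "" then some (PySem.Str.strip v) else none
        | none => none) (k :: ks)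
      = pvF (pvGet listing k) ++ List.filterMap (fun k =>
        match pvGet listing k with
        | some v => if PySem.Str.strip v ≠ "" then some (PySem.Str.strip v) else none
        | none => none) ks := by
    intro k ks
    cases ho : pvGet listing k with
    | none => simp [ho, pvF]
    | some s =>
        by_cases h : PySem.Str.strip s = "" <;> simp [ho, pvF, h]
  simp only [pvFallbackB, pvFieldKeys]
  rw [step, step, step, step, step]
  simp [List.append_assoc]

-- A's two-stage fallback equals B's flat fallback
theorem pvFallback_eq (listing : List (String × String)) :
    pvFallbackA listing = pvFallbackB listing := by
  rw [pvFallbackB_eq]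
  simp only [pvFallbackA]
  generalize pvGet listing "address_address1" = o1
  generalize pvGet listing "address_address2" = o2
  generalize pvGet listing "address_city" = o3
  generalize pvGet listing "address_state" = o4
  generalize pvGet listing "address_postal_code" = o5
  -- the primary/secondary foldl is pvF o1 ++ pvF o2
  have hfold : [o1, o2].foldl (fun acc part =>
      match part with
      | some s => if PySem.Str.strip s ≠ "" then acc ++ [PySem.Str.strip s] else acc
      | none => acc) [] = pvF o1 ++ pvF o2 := by
    cases o1 <;> cases o2 <;>
      simp only [List.foldl_cons, List.foldl_nil, pvF] <;> (try split_ifs) <;> simp_all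
  -- the locality comprehension is pvF o3 ++ pvF o4 ++ pvF o5
  have hstrip : PySem.Str.strip "" = "" := by decide
  have hone : ∀ o : Option String,
      (if PySem.Str.strip (o.getD "") ≠ "" then some (PySem.Str.strip (o.getD "")) else none)
        = (pvF o).head? := by
    intro o
    cases o with
    | none => simp [pvF, hstrip]
    | some s => by_cases h : PySem.Str.strip s = "" <;> simp [pvF, h]
  have hsh : ∀ o : Option String, pvF o = [] ∨ ∃ s, pvF o = [s] := by
    intro o
    cases o with
    | none => exact Or.inl rfl
    | some s =>
        by_cases h : PySem.Str.strip s = ""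
        · exact Or.inl (by simp [pvF, h])
        · exact Or.inr ⟨PySem.Str.strip s, by simp [pvF, h]⟩
  have hloc : [o3.getD "", o4.getD "", o5.getD ""].filterMap
      (fun s => if PySem.Str.strip s ≠ "" then some (PySem.Str.strip s) else none)
      = pvF o3 ++ pvF o4 ++ pvF o5 := by
    simp only [List.filterMap_cons, List.filterMap_nil, hone]
    rcases hsh o3 with h3 | ⟨s3, h3⟩ <;> rcases hsh o4 with h4 | ⟨s4, h4⟩ <;>
      rcases hsh o5 with h5 | ⟨s5, h5⟩ <;> simp [h3, h4, h5]
  rw [hfold, hloc]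
  rw [pv_final (pvF o1 ++ pvF o2) (pvF o3) (pvF o4) (pvF o5)]

-- ===== VERDICT (by name: the statement is the Claim_ definition above) =====
theorem compose_address_py_spec : Claim_equal_compose_address_py := by
  intro listing _
  unfold Spec_compose_address_py compose_address_py compose_address_py_alt
  cases pvGet listing "full_address" with
  | none => exact pvFallback_eq listing
  | some a =>
      by_cases h : PySem.Str.strip a = ""
      · simp [h, pvFallback_eq listing]
      · simp [h]
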